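-- pv_equiv track=rewrite | github.com/manwar/perlweeklychallenge-club | challenge-125/stuart-little/python/ch-2.py | lr
-- ===== SOURCE A (Python) =====
-- def lr(tree):
--     if (len(tree) < 3 or tree[0] == '.'):
--         return [[],[]]
--     if len(tree) == 3:
--         return [["."],["."]]
--     left=[]
--     sm,ix = 0,1
--     while sm != -1:
--         left.append(tree[ix])
--         sm+=(-1 if tree[ix] == '.' else 1)
--         ix+=1
--     right = tree[len(left)+1:]
--     return [left,right]
-- ===== SOURCE B (Python) =====
-- def lr(tree):
--     if (len(tree) < 3 or tree[0] == '.'):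
--         return [[], []]
--     if len(tree) == 3:
--         return [["."], ["."]]
--
--     def parse(toks):
--         # consume one subtree from the front; return (its tokens, the rest)
--         head, rest = toks[0], toks[1:]
--         if head == '.':
--             return [head], rest
--         l, rest = parse(rest)
--         r, rest = parse(rest)
--         return [head] + l + r, rest
--
--     left, right = parse(tree[1:])
--     return [left, right]
-- ===== Notes on version B (the rewrite author's own statement) =====
-- stated objective: alternative
-- what changed: A's balance-counter while-loop over indices is replaced by a recursive-descent parser parse(toks) that splits the token list itself: a leaf takes one token, an internal node takes its token then two recursively parsed subtrees, returning (left-subtree tokens, remaining tokens) with no index arithmetic or slicing at the boundary; Pre_ excludes malformed encodings on which both implementations raise IndexError.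
import Mathlib
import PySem

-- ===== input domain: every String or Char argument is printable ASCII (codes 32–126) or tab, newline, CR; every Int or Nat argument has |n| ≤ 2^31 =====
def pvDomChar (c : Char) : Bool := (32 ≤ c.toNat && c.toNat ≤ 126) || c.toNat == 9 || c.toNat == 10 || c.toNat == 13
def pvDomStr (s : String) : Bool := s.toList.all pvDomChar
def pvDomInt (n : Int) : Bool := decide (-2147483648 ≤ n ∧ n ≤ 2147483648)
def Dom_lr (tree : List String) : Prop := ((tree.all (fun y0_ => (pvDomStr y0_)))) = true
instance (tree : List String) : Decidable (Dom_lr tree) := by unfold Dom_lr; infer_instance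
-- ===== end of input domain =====

-- B replaces A's balance-counter while-loop by a recursive-descent parser that splits the
-- token LIST itself (leaf = one token; node = token, left subtree, right subtree), with no
-- index arithmetic (objective: alternative).

-- ===== PORT A =====
-- the while-loop of A, fuel-bounded; none = IndexError (or fuel out, unreachable for fuel > len(tree)-ix)
def lrLoop (tree : List String) (acc : List String) (sm : Int) (ix : Int) : Nat → Option (List String)
  | 0 => none
  | fuel + 1 =>
    if sm = -1 then some acc
    else
      match PySem.List.pyGet? tree ix with
      | none => none
      | some t => lrLoop tree (acc ++ [t]) (sm + (if t = "." then -1 else 1)) (ix + 1) fuel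

def lr (tree : List String) : List (List String) :=
  if tree.length < 3 ∨ tree.headD "" = "." then [[], []]
  else if tree.length = 3 then [["."], ["."]]
  else
    match lrLoop tree [] 0 1 (tree.length + 1) with
    | none => [[], []]  -- IndexError in Python; outside Pre_lr
    | some left => [left, PySem.List.slice tree (some ((left.length : Int) + 1)) none]

-- ===== PORT B =====
-- B's recursive parse(toks), fuel-bounded; none = IndexError (or fuel out, unreachable for fuel > len(toks))
def parse (fuel : Nat) (toks : List String) : Option (List String × List String) :=
  match fuel, toks with
  | 0, _ => none
  | _ + 1, [] => none  -- toks[0] raises IndexError in Python; outside Pre_lr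
  | f + 1, head :: rest =>
    if head = "." then some ([head], rest)
    else
      match parse f rest with
      | none => none
      | some (l, rest1) =>
        match parse f rest1 with
        | none => none
        | some (r, rest2) => some (head :: (l ++ r), rest2)

def lr_alt (tree : List String) : List (List String) :=
  if tree.length < 3 ∨ tree.headD "" = "." then [[], []]
  else if tree.length = 3 then [["."], ["."]]
  else
    match parse tree.length tree.tail with
    | none => [[], []]  -- IndexError in Python; outside Pre_lr
    | some (left, right) => [left, right]

-- ===== PRECONDITION & SPEC =====
-- running dot/non-dot balance of a token list (dot = -1, other = +1)
def bal (xs : List String) : Int := xs.foldl (fun s t => s + (if t = "." then -1 else 1)) 0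

-- Pre_lr excludes exactly the malformed encodings on which Python A raises IndexError:
-- length ≥ 4, tree[0] ≠ '.', and no in-bounds prefix of tree[1:] has balance -1.
def Pre_lr (tree : List String) : Prop :=
  tree.length < 3 ∨ tree.headD "" = "." ∨ tree.length = 3 ∨
    ∃ k ∈ List.range tree.length, bal ((tree.drop 1).take k) = -1
instance (tree : List String) : Decidable (Pre_lr tree) := by unfold Pre_lr; infer_instance

def pvWitness_lr : List String := ["a", "b", ".", ".", "."]

def Spec_lr (tree : List String) (out : List (List String)) : Prop := out = lr_alt tree
instance (tree : List String) (out : List (List String)) : Decidable (Spec_lr tree out) := by unfold Spec_lr; infer_instance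

-- ===== CLAIM (what is proved, stated in full; the proofs are below) =====
def Claim_equal_lr : Prop := ∀ (tree : List String), Dom_lr tree → Pre_lr tree → Spec_lr tree (lr tree)

-- ===== LEMMAS AND PROOFS =====

-- the common functional spec: stop rest c = index just past c consecutive subtrees read from rest
def stop : List String → Nat → Option Nat
  | _, 0 => some 0
  | [], _ + 1 => none
  | t :: ts, c + 1 => (stop ts (if t = "." then c else c + 2)).map (· + 1)

theorem stop_le : ∀ (rest : List String) (c k : Nat), stop rest c = some k → k ≤ rest.length := by
  intro rest
  induction rest with
  | nil => intro c k h; cases c <;> simp [stop] at h; omega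
  | cons t ts ih =>
    intro c k h
    cases c with
    | zero => simp [stop] at h; omega
    | succ c =>
      simp only [stop, Option.map_eq_some_iff] at h
      obtain ⟨j, hj, rfl⟩ := h
      have := ih _ _ hj
      simp; omega

theorem stop_comp : ∀ (rest : List String) (c1 c2 : Nat),
    stop rest (c1 + c2) = (stop rest c1).bind (fun k => (stop (rest.drop k) c2).map (k + ·)) := by
  intro rest
  induction rest with
  | nil =>
    intro c1 c2
    cases c1 with
    | zero => simp [stop]
    | succ c1 => cases c2 <;> simp [stop]
  | cons t ts ih =>
    intro c1 c2
    cases c1 with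
    | zero => simp [stop]
    | succ c1 =>
      have h : c1 + 1 + c2 = (c1 + c2) + 1 := by omega
      rw [h]
      simp only [stop]
      have h3 : (if t = "." then c1 + c2 else c1 + c2 + 2)
          = (if t = "." then c1 else c1 + 2) + c2 := by split <;> omega
      rw [h3, ih]
      cases hs : stop ts (if t = "." then c1 else c1 + 2) with
      | none => simp
      | some k =>
        simp only [Option.map_some, Option.bind_some, List.drop_succ_cons]
        cases hs2 : stop (ts.drop k) c2 with
        | none => simp
        | some j =>
          simp only [Option.map_some]
          congr 1
          omega

theorem parse_eq : ∀ (fuel : Nat) (toks : List String), toks.length < fuel →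
    parse fuel toks = (stop toks 1).map (fun k => (toks.take k, toks.drop k)) := by
  intro fuel
  induction fuel with
  | zero => intro toks h; omega
  | succ f ih =>
    intro toks h
    cases toks with
    | nil => simp [parse, stop]
    | cons t ts =>
      by_cases ht : t = "."
      · subst ht
        simp [parse, stop]
      · simp only [parse, if_neg ht]
        rw [ih ts (by simpa using Nat.lt_of_succ_lt_succ h)]
        have hsplit : stop (t :: ts) 1 = (stop ts (1 + 1)).map (· + 1) := by
          simp [stop, ht]
        rw [hsplit, stop_comp]
        cases hs : stop ts 1 with
        | none => simp
        | some k =>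
          have hk : k ≤ ts.length := stop_le _ _ _ hs
          simp only [Option.map_some, Option.bind_some]
          rw [ih (ts.drop k) (by simp only [List.length_cons] at h; simp; omega)]
          cases hs2 : stop (ts.drop k) 1 with
          | none => simp
          | some j =>
            simp only [Option.map_some]
            have htake : ts.take k ++ (ts.drop k).take j = ts.take (k + j) := by
              rw [List.take_add]
            have hdrop : (ts.drop k).drop j = ts.drop (k + j) := by
              rw [List.drop_drop]
            simp [htake, hdrop]

theorem lrLoop_eq : ∀ (fuel : Nat) (tree : List String) (i c : Nat) (acc : List String),
    tree.length - i < fuel →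
    lrLoop tree acc ((c : Int) - 1) (i : Int) fuel
      = (stop (tree.drop i) c).map (fun k => acc ++ (tree.drop i).take k) := by
  intro fuel
  induction fuel with
  | zero => intro tree i c acc h; omega
  | succ f ih =>
    intro tree i c acc h
    cases c with
    | zero => simp [lrLoop, stop]
    | succ c =>
      have hne : ¬ (((c + 1 : Nat) : Int) - 1 = -1) := by push_cast; omega
      simp only [lrLoop, if_neg hne]
      by_cases hi : i < tree.length
      · have hdrop : tree.drop i = tree[i] :: tree.drop (i + 1) := List.drop_eq_getElem_cons hi
        simp only [PySem.List.pyGet?_natCast, List.getElem?_eq_getElem hi]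
        have hcast : ((i : Nat) : Int) + 1 = ((i + 1 : Nat) : Int) := by push_cast; ring
        by_cases ht : tree[i] = "."
        · have hsm : ((c + 1 : Nat) : Int) - 1 + (if tree[i] = "." then (-1 : Int) else 1)
              = ((c : Nat) : Int) - 1 := by rw [if_pos ht]; push_cast; ring
          rw [hsm, hcast, ih tree (i + 1) c (acc ++ [tree[i]]) (by omega), hdrop]
          simp only [stop, ht, if_pos]
          cases stop (tree.drop (i + 1)) c with
          | none => simp
          | some k => simp [List.take_succ_cons]
        · have hsm : ((c + 1 : Nat) : Int) - 1 + (if tree[i] = "." then (-1 : Int) else 1)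
              = ((c + 2 : Nat) : Int) - 1 := by rw [if_neg ht]; push_cast; ring
          rw [hsm, hcast, ih tree (i + 1) (c + 2) (acc ++ [tree[i]]) (by omega), hdrop]
          simp only [stop, ht, if_false]
          cases stop (tree.drop (i + 1)) (c + 2) with
          | none => simp
          | some k =>
            simp only [Option.map_some]
            rw [List.take_succ_cons]
            simp
      · have : tree[(i : Nat)]? = none := by rw [List.getElem?_eq_none_iff]; omega
        have hdrop : tree.drop i = [] := by rw [List.drop_eq_nil_iff]; omega
        simp [PySem.List.pyGet?_natCast, this, hdrop, stop]

-- ===== VERDICT (by name: the statement is the Claim_ definition above) =====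
theorem lr_spec : Claim_equal_lr := by
  intro tree _ _
  unfold Spec_lr lr lr_alt
  by_cases h1 : tree.length < 3 ∨ tree.headD "" = "."
  · rw [if_pos h1, if_pos h1]
  · simp only [if_neg h1]
    by_cases h2 : tree.length = 3
    · simp [h2]
    · simp only [if_neg h2]
      have hlen : 3 < tree.length := by
        rcases Nat.lt_or_ge tree.length 3 with h | h
        · exact absurd (Or.inl h) h1
        · omega
      have hA : lrLoop tree [] 0 1 (tree.length + 1)
          = (stop (tree.drop 1) 1).map (fun k => [] ++ (tree.drop 1).take k) := by
        have := lrLoop_eq (tree.length + 1) tree 1 1 [] (by omega)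
        simpa using this
      have hB : parse tree.length tree.tail
          = (stop (tree.drop 1) 1).map (fun k => ((tree.drop 1).take k, (tree.drop 1).drop k)) := by
        rw [← List.drop_one]
        exact parse_eq tree.length (tree.drop 1) (by simp; omega)
      rw [hA, hB]
      cases hs : stop (tree.drop 1) 1 with
      | none => simp
      | some k =>
        simp only [Option.map_some, List.nil_append]
        have hlenk : ((tree.drop 1).take k).length = k := by
          have := stop_le _ _ _ hs
          simp at this ⊢; omega
        have hright : PySem.List.slice tree (some ((((tree.drop 1).take k).length : Int) + 1)) none
            = (tree.drop 1).drop k := by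
          rw [hlenk]
          have hcast : ((k : Int) + 1) = (((k + 1 : Nat)) : Int) := by push_cast; ring
          rw [hcast, PySem.List.slice_from_natCast, List.drop_drop]
          congr 1
          omega
        rw [hright]

-- pvWitness_lr satisfies Dom and Pre
theorem pvWitness_lr_ok : Dom_lr pvWitness_lr ∧ Pre_lr pvWitness_lr := by decide
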